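-- pv_equiv track=rewrite | github.com/isyuricunha/zephon-traducao-portugues-brasileiro | translate.py | rebuild_value
-- ===== SOURCE A (Python) =====
-- def rebuild_value(original_segments: list[str], translated_texts: list[str]) -> str:
--     """
--     Reconstruct the full value string by merging translated text segments
--     back together with the untouched XML tags.
--
--     original_segments: result of extract_text_segments() on the original value.
--     translated_texts: translated plain-text tokens (same count as even-index items).
--     """
--     result_parts: list[str] = []
--     text_index = 0
--
--     for i, segment in enumerate(original_segments):
--         if i % 2 == 0:
--             # Even index → plain text; replace with translation
--             if text_index < len(translated_texts):
--                 result_parts.append(translated_texts[text_index])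
--                 text_index += 1
--             else:
--                 result_parts.append(segment)
--         else:
--             # Odd index → XML tag; keep exactly as-is
--             result_parts.append(segment)
--
--     return "".join(result_parts)
-- ===== SOURCE B (Python) =====
-- def rebuild_value(original_segments: list[str], translated_texts: list[str]) -> str:
--     result = list(original_segments)
--     for j, translation in enumerate(translated_texts):
--         pos = 2 * j
--         if pos < len(result):
--             result[pos] = translation
--     return "".join(result)
-- ===== Notes on version B (the rewrite author's own statement) =====
-- stated objective: simpler
-- what changed: B copies the segment list and iterates over the translations, overwriting result[2*j] directly when in range, instead of scanning segments with an i%2 branch and a running text_index counter.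
import Mathlib
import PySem

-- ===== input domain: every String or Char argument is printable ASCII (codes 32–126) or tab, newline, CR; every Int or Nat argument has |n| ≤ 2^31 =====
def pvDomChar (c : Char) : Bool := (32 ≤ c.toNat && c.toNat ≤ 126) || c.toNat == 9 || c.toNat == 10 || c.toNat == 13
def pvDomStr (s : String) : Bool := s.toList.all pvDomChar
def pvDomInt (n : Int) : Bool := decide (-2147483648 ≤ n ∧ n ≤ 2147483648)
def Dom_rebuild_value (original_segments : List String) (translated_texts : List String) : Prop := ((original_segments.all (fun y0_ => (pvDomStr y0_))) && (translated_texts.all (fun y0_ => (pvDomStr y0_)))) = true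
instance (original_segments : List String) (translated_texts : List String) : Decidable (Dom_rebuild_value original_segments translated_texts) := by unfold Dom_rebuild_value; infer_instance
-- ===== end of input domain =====

-- B copies the segment list and overwrites even positions directly from the translations list
-- (instead of A's segment scan with an i%2 branch and a running counter); objective: simpler.


-- ===== PORT A =====
-- A's for-loop over (i, segment) with state (result_parts, text_index), as structural recursion.
def rebuildA_loop (tt : List String) : List String → Nat → Nat → List String → List String
  | [], _, _, parts => parts
  | s :: rest, i, ti, parts =>
    if i % 2 == 0 then
      if ti < tt.length then
        rebuildA_loop tt rest (i + 1) (ti + 1) (parts ++ [tt.getD ti ""])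
      else
        rebuildA_loop tt rest (i + 1) ti (parts ++ [s])
    else
      rebuildA_loop tt rest (i + 1) ti (parts ++ [s])

def rebuild_value (original_segments : List String) (translated_texts : List String) : String :=
  PySem.Str.join "" (rebuildA_loop translated_texts original_segments 0 0 [])

-- ===== PORT B =====
-- B's for-loop over enumerate(translated_texts) mutating the copied result list.
def rebuildB_loop : List String → Nat → List String → List String
  | [], _, result => result
  | t :: ts, j, result =>
    rebuildB_loop ts (j + 1) (if 2 * j < result.length then result.set (2 * j) t else result)

def rebuild_value_alt (original_segments : List String) (translated_texts : List String) : String :=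
  PySem.Str.join "" (rebuildB_loop translated_texts 0 original_segments)

-- ===== PRECONDITION & SPEC =====
def Spec_rebuild_value (original_segments : List String) (translated_texts : List String) (out : String) : Prop := out = rebuild_value_alt original_segments translated_texts
instance (original_segments : List String) (translated_texts : List String) (out : String) : Decidable (Spec_rebuild_value original_segments translated_texts out) := by unfold Spec_rebuild_value; infer_instance

-- ===== CLAIM (what is proved, stated in full; the proofs are below) =====
def Claim_equal_rebuild_value : Prop := ∀ (original_segments : List String) (translated_texts : List String), Dom_rebuild_value original_segments translated_texts → Spec_rebuild_value original_segments translated_texts (rebuild_value original_segments translated_texts)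

-- ===== LEMMAS AND PROOFS =====

-- Common reference shape: merge translations into os, the flag marking an even (text) position.
def mergeAux : Bool → List String → List String → List String
  | _, _, [] => []
  | false, ts, s :: rest => s :: mergeAux true ts rest
  | true, [], s :: rest => s :: mergeAux false [] rest
  | true, t :: ts, _ :: rest => t :: mergeAux false ts rest

theorem mergeAux_nil_ts (b : Bool) (os : List String) : mergeAux b [] os = os := by
  induction os generalizing b with
  | nil => cases b <;> rfl
  | cons s rest ih => cases b <;> simp [mergeAux, ih]

theorem rebuildA_eq_mergeAux (tt : List String) (os : List String) :
    ∀ (i ti : Nat) (parts : List String),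
      rebuildA_loop tt os i ti parts = parts ++ mergeAux (i % 2 == 0) (List.drop ti tt) os := by
  induction os with
  | nil => intro i ti parts; simp [rebuildA_loop, mergeAux]
  | cons s rest ih =>
    intro i ti parts
    by_cases he : i % 2 = 0
    · have hb : (i % 2 == 0) = true := by simp [he]
      have hb1 : ((i + 1) % 2 == 0) = false := by
        simp [Nat.succ_mod_two_eq_one_iff.mpr he]
      by_cases hti : ti < tt.length
      · have hdrop : List.drop ti tt = tt[ti] :: List.drop (ti + 1) tt :=
          List.drop_eq_getElem_cons hti
        have hget : tt.getD ti "" = tt[ti] := List.getD_eq_getElem tt "" hti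
        simp only [rebuildA_loop, hb, if_true, hti, ih, hb1, hdrop, mergeAux, hget]
        simp
      · have hdrop : List.drop ti tt = [] := List.drop_eq_nil_of_le (by omega)
        simp only [rebuildA_loop, hb, if_true, hti, if_false, ih, hb1, hdrop, mergeAux]
        simp
    · have hb : (i % 2 == 0) = false := by simp [he]
      have h1 : ((i + 1) % 2 == 0) = true := by simp; omega
      simp only [rebuildA_loop, hb, ih, h1, mergeAux]
      simp

theorem rebuildB_loop_of_le (ts : List String) :
    ∀ (j : Nat) (r : List String), r.length ≤ 2 * j → rebuildB_loop ts j r = r := by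
  induction ts with
  | nil => intro j r _; rfl
  | cons t ts ih =>
    intro j r h
    have hnot : ¬ 2 * j < r.length := by omega
    simp [rebuildB_loop, hnot]
    exact ih (j + 1) r (by omega)

theorem rebuildB_loop_shift (ts : List String) :
    ∀ (j : Nat) (a b : String) (rest : List String),
      rebuildB_loop ts (j + 1) (a :: b :: rest) = a :: b :: rebuildB_loop ts j rest := by
  induction ts with
  | nil => intro j a b rest; rfl
  | cons t ts ih =>
    intro j a b rest
    by_cases h : 2 * j < rest.length
    · have h' : 2 * (j + 1) < (a :: b :: rest).length := by simp; omega
      have hset : (a :: b :: rest).set (2 * (j + 1)) t = a :: b :: rest.set (2 * j) t := by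
        have h2 : 2 * (j + 1) = (2 * j) + 1 + 1 := by ring
        rw [h2]; rfl
      rw [rebuildB_loop, if_pos h', hset, ih, rebuildB_loop, if_pos h]
    · have h' : ¬ 2 * (j + 1) < (a :: b :: rest).length := by simp; omega
      rw [rebuildB_loop, if_neg h', ih, rebuildB_loop, if_neg h]

theorem rebuildB_eq_mergeAux (ts os : List String) :
    rebuildB_loop ts 0 os = mergeAux true ts os := by
  match os, ts with
  | [], ts =>
    rw [rebuildB_loop_of_le ts 0 [] (by simp)]; simp [mergeAux]
  | a :: rest, [] =>
    simp [rebuildB_loop, mergeAux_nil_ts]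
  | [a], t :: ts =>
    simp [rebuildB_loop, List.set]
    rw [rebuildB_loop_of_le ts 1 [t] (by simp)]
    rfl
  | a :: b :: rest, t :: ts =>
    have h : 2 * 0 < (a :: b :: rest).length := by simp
    simp only [rebuildB_loop, h, if_pos]
    have hset : (a :: b :: rest).set (2 * 0) t = t :: b :: rest := by simp [List.set]
    rw [hset]
    rw [show (0 + 1 : Nat) = 0 + 1 from rfl, rebuildB_loop_shift ts 0 t b rest]
    rw [rebuildB_eq_mergeAux ts rest]
    rfl
  termination_by os.length

-- ===== VERDICT (by name: the statement is the Claim_ definition above) =====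
theorem rebuild_value_spec : Claim_equal_rebuild_value := by
  intro os tt _
  unfold Spec_rebuild_value rebuild_value rebuild_value_alt
  rw [rebuildA_eq_mergeAux tt os 0 0 [], rebuildB_eq_mergeAux tt os]
  simp
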